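-- pv_equiv track=rewrite | github.com/bncszb/snomed-neo4j | scripts/utils/snomed_utils.py | format_concept_id
-- ===== SOURCE A (Python) =====
-- def format_concept_id(concept_id):
--     """Format a SNOMED CT concept ID with proper spacing."""
--     if not concept_id:
--         return ""
--
--     # Ensure the ID is a string
--     concept_id = str(concept_id)
--
--     # SNOMED CT IDs are typically formatted with a space every 3 digits
--     # e.g., 123 456 789
--     if len(concept_id) <= 3:
--         return concept_id
--
--     formatted = ""
--     for i in range(0, len(concept_id), 3):
--         chunk = concept_id[i:i+3]
--         if formatted:
--             formatted += " " + chunk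
--         else:
--             formatted = chunk
--
--     return formatted
-- ===== SOURCE B (Python) =====
-- import re
--
-- def format_concept_id(concept_id):
--     """Format a SNOMED CT concept ID with proper spacing."""
--     if not concept_id:
--         return ""
--     concept_id = str(concept_id)
--     return re.sub(r'(?s)(.{3})(?=.)', r'\1 ', concept_id)
-- ===== Notes on version B (the rewrite author's own statement) =====
-- stated objective: idiomatic
-- what changed: Replaces the explicit range/slice loop with accumulator concatenation by a single DOTALL regex substitution that inserts a space after every group of 3 characters followed by at least one more character.
import Mathlib
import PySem

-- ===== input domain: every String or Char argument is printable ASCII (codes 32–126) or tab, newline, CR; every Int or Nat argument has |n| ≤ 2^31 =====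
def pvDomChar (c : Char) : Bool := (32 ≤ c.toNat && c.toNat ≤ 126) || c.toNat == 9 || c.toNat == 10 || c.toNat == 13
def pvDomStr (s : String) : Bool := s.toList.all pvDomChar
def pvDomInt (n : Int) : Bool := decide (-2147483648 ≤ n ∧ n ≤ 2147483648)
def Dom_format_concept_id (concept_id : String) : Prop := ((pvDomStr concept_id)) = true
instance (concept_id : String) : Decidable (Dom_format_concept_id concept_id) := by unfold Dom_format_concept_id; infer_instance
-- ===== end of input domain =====

-- B replaces A's range(0,len,3) slice-and-accumulate loop by one regex substitution
-- (re.sub(r'(?s)(.{3})(?=.)', r'\1 ', s)), ported as a direct recursive scan; objective: idiomatic.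


-- ===== PORT A =====
-- A's loop: for i in range(0, len(cid), 3): chunk = cid[i:i+3]; formatted += " "+chunk (or = chunk first time)
def format_concept_id (concept_id : String) : String :=
  if concept_id.toList = [] then ""
  else if PySem.Str.len concept_id ≤ 3 then concept_id
  else
    String.ofList
      ((PySem.List.pyRange 0 (PySem.Str.len concept_id) 3).foldl
        (fun formatted i =>
          let chunk := PySem.List.slice concept_id.toList (some i) (some (i + 3))
          if formatted ≠ [] then formatted ++ ' ' :: chunk else chunk) [])

-- ===== PORT B =====
-- Hand port of re.sub(r'(?s)(.{3})(?=.)', r'\1 ', s): the scanner matches exactly 3 arbitrary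
-- characters (DOTALL) with at least one character remaining, emits them plus a space, and resumes
-- right after the match; this recursion is exact for that pattern.
def pvChunk3 : List Char → List Char
  | c1 :: c2 :: c3 :: c4 :: rest => c1 :: c2 :: c3 :: ' ' :: pvChunk3 (c4 :: rest)
  | l => l

def format_concept_id_alt (concept_id : String) : String :=
  if concept_id.toList = [] then ""
  else String.ofList (pvChunk3 concept_id.toList)

-- ===== PRECONDITION & SPEC =====
def Spec_format_concept_id (concept_id : String) (out : String) : Prop := out = format_concept_id_alt concept_id
instance (concept_id : String) (out : String) : Decidable (Spec_format_concept_id concept_id out) := by unfold Spec_format_concept_id; infer_instance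

-- ===== CLAIM (what is proved, stated in full; the proofs are below) =====
def Claim_equal_format_concept_id : Prop := ∀ (concept_id : String), Dom_format_concept_id concept_id → Spec_format_concept_id concept_id (format_concept_id concept_id)

-- ===== LEMMAS AND PROOFS =====

-- tail of the chunking: every remaining chunk with its leading space
def pvSp : List Char → List Char
  | [] => []
  | c :: rest => ' ' :: (c :: rest).take 3 ++ pvSp ((c :: rest).drop 3)
  termination_by l => l.length
  decreasing_by simp

-- B's scan, characterised head-chunk-first
theorem pvChunk3_eq_take_sp (cs : List Char) :
    pvChunk3 cs = cs.take 3 ++ pvSp (cs.drop 3) := by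
  match cs with
  | [] => simp [pvChunk3, pvSp]
  | [c1] => simp [pvChunk3, pvSp]
  | [c1, c2] => simp [pvChunk3, pvSp]
  | [c1, c2, c3] => simp [pvChunk3, pvSp]
  | c1 :: c2 :: c3 :: c4 :: rest =>
    have ih := pvChunk3_eq_take_sp (c4 :: rest)
    simp [pvChunk3, pvSp, ih]

-- the loop body of A, after the slices are rewritten to take/drop
def pvStep (cs : List Char) (acc : List Char) (k : Nat) : List Char :=
  if acc ≠ [] then acc ++ ' ' :: (cs.drop (3 * k)).take 3 else (cs.drop (3 * k)).take 3

-- shifting the chunk index by one step is running the loop body on the 3-dropped suffix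
theorem pvStep_shift (c : Char) (rest : List Char) :
    (fun (a : List Char) (k : Nat) => pvStep (c :: rest) a (k + 1))
      = pvStep ((c :: rest).drop 3) := by
  funext a k
  have h3 : 3 * (k + 1) = 3 + 3 * k := by ring
  simp only [pvStep, h3, ← List.drop_drop]

-- the loop with a nonempty accumulator appends pvSp of the remaining suffix
theorem pvFold_sp (cs acc : List Char) (hacc : acc ≠ []) :
    (List.range ((cs.length + 2) / 3)).foldl (pvStep cs) acc = acc ++ pvSp cs := by
  match cs with
  | [] => simp [pvSp]
  | c :: rest =>
    have hm : (( (c :: rest).length + 2) / 3) = ((( (c :: rest).drop 3).length + 2) / 3) + 1 := by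
      simp [List.length_drop]; omega
    rw [hm, List.range_succ_eq_map, List.foldl_cons, List.foldl_map]
    have hstep : pvStep (c :: rest) acc 0 = acc ++ ' ' :: (c :: rest).take 3 := by
      simp [pvStep, hacc]
    rw [hstep, pvStep_shift c rest]
    have ih := pvFold_sp ((c :: rest).drop 3) (acc ++ ' ' :: (c :: rest).take 3) (by simp)
    rw [ih, pvSp]
    simp
  termination_by cs.length
  decreasing_by simp

-- A's loop, started empty on a nonempty list, computes B's scan
theorem pvFold_chunk3 (cs : List Char) (h : cs ≠ []) :
    (List.range ((cs.length + 2) / 3)).foldl (pvStep cs) [] = pvChunk3 cs := by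
  match cs with
  | c :: rest =>
    have hm : (( (c :: rest).length + 2) / 3) = ((( (c :: rest).drop 3).length + 2) / 3) + 1 := by
      simp [List.length_drop]; omega
    rw [hm, List.range_succ_eq_map, List.foldl_cons, List.foldl_map]
    have hstep : pvStep (c :: rest) [] 0 = (c :: rest).take 3 := by simp [pvStep]
    rw [hstep, pvStep_shift c rest,
      pvFold_sp ((c :: rest).drop 3) ((c :: rest).take 3) (by simp),
      pvChunk3_eq_take_sp]

-- A's pyRange/slice loop is the range-of-chunk-indices loop pvStep
theorem pvLoopA_eq (cs : List Char) (h : cs ≠ []) :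
    (PySem.List.pyRange 0 ((cs.length : Int)) 3).foldl
        (fun formatted i =>
          let chunk := PySem.List.slice cs (some i) (some (i + 3))
          if formatted ≠ [] then formatted ++ ' ' :: chunk else chunk) []
      = (List.range ((cs.length + 2) / 3)).foldl (pvStep cs) [] := by
  rw [PySem.List.pyRange_of_pos 0 (cs.length : Int) (by omega)]
  have hlen : (0 : Int) < (cs.length : Int) := by
    have : 0 < cs.length := List.length_pos_iff.mpr h
    exact_mod_cast this
  rw [if_pos hlen, List.foldl_map]
  have hcnt : ((( (cs.length : Int)) - 0 + 3 - 1) / 3).toNat = (cs.length + 2) / 3 := by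
    omega
  rw [hcnt]
  have hfun : (fun (a : List Char) (k : Nat) =>
        let chunk := PySem.List.slice cs (some (0 + 3 * (k : Int))) (some (0 + 3 * (k : Int) + 3))
        if a ≠ [] then a ++ ' ' :: chunk else chunk)
      = pvStep cs := by
    funext a k
    have hsl : PySem.List.slice cs (some (0 + 3 * (k : Int))) (some (0 + 3 * (k : Int) + 3))
        = (cs.drop (3 * k)).take 3 := by
      have := PySem.List.slice_natCast_add cs (3 * k) 3
      push_cast at this ⊢
      simpa using this
    simp only [hsl, pvStep]
  rw [hfun]

-- B's scan is the identity on short lists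
theorem pvChunk3_short (cs : List Char) (h : cs.length ≤ 3) : pvChunk3 cs = cs := by
  match cs with
  | [] => rfl
  | [c1] => simp [pvChunk3]
  | [c1, c2] => simp [pvChunk3]
  | [c1, c2, c3] => simp [pvChunk3]
  | c1 :: c2 :: c3 :: c4 :: rest => exfalso; simp at h; omega

-- ===== VERDICT (by name: the statement is the Claim_ definition above) =====
theorem format_concept_id_spec : Claim_equal_format_concept_id := by
  intro s _
  unfold Spec_format_concept_id format_concept_id format_concept_id_alt
  by_cases hnil : s.toList = []
  · simp [hnil]
  · rw [if_neg hnil, if_neg hnil]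
    by_cases hlen : PySem.Str.len s ≤ 3
    · rw [if_pos hlen]
      have h3 : s.toList.length ≤ 3 := by
        have := PySem.Str.len_eq s
        omega
      rw [pvChunk3_short s.toList h3]
      simp
    · rw [if_neg hlen]
      have hlen' : PySem.Str.len s = (s.toList.length : Int) := PySem.Str.len_eq s
      rw [hlen', pvLoopA_eq s.toList hnil, pvFold_chunk3 s.toList hnil]
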